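-- pv_equiv track=rewrite | github.com/CemalGuvenAdal/Bioinformatics-BruteForce-KMP-and-Boyer-Moore-algorithms | main.py | BadCharMatrix
-- ===== SOURCE A (Python) =====
-- T=""
--
-- def BadCharMatrix(motiv):
--     rows,cols = (len(motiv), 4)
--     badmatrix = [[-1 for i in range(cols)] for j in range(rows)]
--
--
--     for i in range(0,len(motiv)):
--         A=True
--         C=True
--         G=True
--         T=True
--         motiveinterval=motiv[0:i+1]
--         for j in range(0,len(motiveinterval)):
--
--             if(motiveinterval[len(motiveinterval)-j-1]=="A" and A):
--                 badmatrix[i][0]=len(motiveinterval)-j-1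
--                 A=False
--
--             if(motiveinterval[len(motiveinterval)-j-1]=="C" and C):
--                 badmatrix[i][1]=len(motiveinterval)-j-1
--                 C=False
--             if(motiveinterval[len(motiveinterval)-j-1]=="G" and G):
--                 badmatrix[i][2]=len(motiveinterval)-j-1
--                 G=False
--             if(motiveinterval[len(motiveinterval)-j-1]=="T" and T):
--                 badmatrix[i][3]=len(motiveinterval)-j-1
--                 T=False
--
--     return badmatrix
-- ===== SOURCE B (Python) =====
-- def BadCharMatrix(motiv):
--     idx = {"A": 0, "C": 1, "G": 2, "T": 3}
--     last = [-1, -1, -1, -1]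
--     out = []
--     for i, ch in enumerate(motiv):
--         j = idx.get(ch)
--         if j is not None:
--             last[j] = i
--         out.append(list(last))
--     return out
-- ===== Notes on version B (the rewrite author's own statement) =====
-- stated objective: faster
-- what changed: Instead of re-scanning each prefix backwards with per-letter flags (quadratic), B makes one forward pass carrying the last-seen index of each of A/C/G/T and appends a copy of that row per character.
import Mathlib
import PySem

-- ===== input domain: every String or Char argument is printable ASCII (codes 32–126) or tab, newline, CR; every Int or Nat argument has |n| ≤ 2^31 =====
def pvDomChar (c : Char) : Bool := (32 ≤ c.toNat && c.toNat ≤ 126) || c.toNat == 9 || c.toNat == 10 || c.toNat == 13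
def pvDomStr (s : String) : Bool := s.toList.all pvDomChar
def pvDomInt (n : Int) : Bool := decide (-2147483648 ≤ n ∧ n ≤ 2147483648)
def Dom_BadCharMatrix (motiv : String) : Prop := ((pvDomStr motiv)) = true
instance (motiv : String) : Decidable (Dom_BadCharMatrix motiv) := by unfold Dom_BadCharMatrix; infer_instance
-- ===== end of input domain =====

-- B replaces A's quadratic backward re-scan of every prefix by one forward pass
-- that carries the last-seen index of each of A/C/G/T (asymptotically faster).

-- ===== PORT A =====
-- State of A's inner loop: (values a,c,g,t ; flags A,C,G,T). The four sequential
-- `if` statements of the Python inner-loop body, on the char at absolute index pos.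
def stepA (ch : Char) (pos : Int) :
    Int × Int × Int × Int × Bool × Bool × Bool × Bool →
    Int × Int × Int × Int × Bool × Bool × Bool × Bool
  | (a, c, g, t, fa, fc, fg, ft) =>
    let a' := if ch == 'A' && fa then pos else a
    let fa' := if ch == 'A' && fa then false else fa
    let c' := if ch == 'C' && fc then pos else c
    let fc' := if ch == 'C' && fc then false else fc
    let g' := if ch == 'G' && fg then pos else g
    let fg' := if ch == 'G' && fg then false else fg
    let t' := if ch == 'T' && ft then pos else t
    let ft' := if ch == 'T' && ft then false else ft
    (a', c', g', t', fa', fc', fg', ft')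

-- A's inner loop `for j in range(len(interval))` accessing interval[len-j-1]:
-- structural recursion over the reversed interval, pos = len-j-1 counting down.
def scanA : List Char → Int → (Int × Int × Int × Int × Bool × Bool × Bool × Bool) →
    Int × Int × Int × Int × Bool × Bool × Bool × Bool
  | [], _, st => st
  | ch :: rest, pos, st => scanA rest (pos - 1) (stepA ch pos st)

-- One outer-loop iteration: row i of badmatrix, starting from the [-1,-1,-1,-1]
-- row with all four flags True; interval = motiv[0:i+1].
def rowA (interval : List Char) : List Int :=
  let st := scanA interval.reverse ((interval.length : Int) - 1)
              (-1, -1, -1, -1, true, true, true, true)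
  [st.1, st.2.1, st.2.2.1, st.2.2.2.1]

-- rows of badmatrix are written independently by the outer loop
def BadCharMatrix (motiv : String) : List (List Int) :=
  (List.range motiv.toList.length).map (fun i => rowA (motiv.toList.take (i + 1)))

-- ===== PORT B =====
-- update of `last` for the character at index i (idx.get: non-ACGT leaves `last` unchanged)
def stepB (i : Int) (ch : Char) (last : Int × Int × Int × Int) : Int × Int × Int × Int :=
  if ch == 'A' then (i, last.2.1, last.2.2.1, last.2.2.2)
  else if ch == 'C' then (last.1, i, last.2.2.1, last.2.2.2)
  else if ch == 'G' then (last.1, last.2.1, i, last.2.2.2)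
  else if ch == 'T' then (last.1, last.2.1, last.2.2.1, i)
  else last

-- the single forward pass: enumerate, update `last`, append a copy of it
def loopB : List Char → Int → (Int × Int × Int × Int) → List (List Int)
  | [], _, _ => []
  | ch :: rest, i, last =>
    let l := stepB i ch last
    [l.1, l.2.1, l.2.2.1, l.2.2.2] :: loopB rest (i + 1) l

def BadCharMatrix_alt (motiv : String) : List (List Int) :=
  loopB motiv.toList 0 (-1, -1, -1, -1)

-- ===== PRECONDITION & SPEC =====
def Spec_BadCharMatrix (motiv : String) (out : List (List Int)) : Prop := out = BadCharMatrix_alt motiv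
instance (motiv : String) (out : List (List Int)) : Decidable (Spec_BadCharMatrix motiv out) := by unfold Spec_BadCharMatrix; infer_instance

-- ===== CLAIM (what is proved, stated in full; the proofs are below) =====
def Claim_equal_BadCharMatrix : Prop := ∀ (motiv : String), Dom_BadCharMatrix motiv → Spec_BadCharMatrix motiv (BadCharMatrix motiv)

-- ===== LEMMAS AND PROOFS =====

-- position (counting down from pos) of the first occurrence of t in l, default v
def firstHit (t : Char) : List Char → Int → Int → Int
  | [], _, v => v
  | c :: rest, pos, v => if c == t then pos else firstHit t rest (pos - 1) v

def noHit (t : Char) : List Char → Bool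
  | [] => true
  | c :: rest => if c == t then false else noHit t rest

def Fval (t : Char) (rev : List Char) (pos v : Int) (f : Bool) : Int :=
  if f then firstHit t rev pos v else v

def Fflg (t : Char) (rev : List Char) (f : Bool) : Bool :=
  f && noHit t rev

theorem Fval_cons (t ch : Char) (rest : List Char) (pos v : Int) (f : Bool) :
    Fval t (ch :: rest) pos v f =
      Fval t rest (pos - 1) (if ch == t && f then pos else v)
        (if ch == t && f then false else f) := by
  by_cases h : ch = t <;> cases f <;> simp_all [Fval, firstHit]

theorem Fflg_cons (t ch : Char) (rest : List Char) (f : Bool) :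
    Fflg t (ch :: rest) f = Fflg t rest (if ch == t && f then false else f) := by
  by_cases h : ch = t <;> cases f <;> simp_all [Fflg, noHit]

theorem scanA_char (rev : List Char) : ∀ (pos a c g t : Int) (fa fc fg ft : Bool),
    scanA rev pos (a, c, g, t, fa, fc, fg, ft) =
      (Fval 'A' rev pos a fa, Fval 'C' rev pos c fc, Fval 'G' rev pos g fg,
       Fval 'T' rev pos t ft,
       Fflg 'A' rev fa, Fflg 'C' rev fc, Fflg 'G' rev fg, Fflg 'T' rev ft) := by
  induction rev with
  | nil => intro pos a c g t fa fc fg ft; simp [scanA, Fval, Fflg, firstHit, noHit]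
  | cons ch rest ih =>
    intro pos a c g t fa fc fg ft
    simp only [scanA, stepA, ih, Fval_cons, Fflg_cons]

-- last-seen index of t during a forward pass starting at index i, default v
def lastHit (t : Char) : List Char → Int → Int → Int
  | [], _, v => v
  | c :: rest, i, v => lastHit t rest (i + 1) (if c == t then i else v)

-- B's fold of the whole prefix (loopB's `last`, without the output list)
def foldStep : List Char → Int → (Int × Int × Int × Int) → Int × Int × Int × Int
  | [], _, last => last
  | ch :: rest, i, last => foldStep rest (i + 1) (stepB i ch last)

theorem foldStep_char (l : List Char) : ∀ (i : Int) (a c g t : Int),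
    foldStep l i (a, c, g, t) =
      (lastHit 'A' l i a, lastHit 'C' l i c, lastHit 'G' l i g, lastHit 'T' l i t) := by
  induction l with
  | nil => intro i a c g t; simp [foldStep, lastHit]
  | cons ch rest ih =>
    intro i a c g t
    simp only [foldStep, stepB]
    by_cases hA : ch = 'A' <;> by_cases hC : ch = 'C' <;>
      by_cases hG : ch = 'G' <;> by_cases hT : ch = 'T' <;>
      simp_all [lastHit]

theorem firstHit_append (t c : Char) (xs : List Char) : ∀ (pos v : Int),
    firstHit t (xs ++ [c]) pos v =
      firstHit t xs pos (if c == t then pos - xs.length else v) := by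
  induction xs with
  | nil => intro pos v; by_cases h : c = t <;> simp_all [firstHit]
  | cons x rest ih =>
    intro pos v
    simp only [List.cons_append, firstHit, ih]
    by_cases hx : x = t
    · simp [hx]
    · have hx' : (x == t) = false := by simp [hx]
      simp only [hx', Bool.false_eq_true, if_false]
      congr 1
      by_cases hc : c = t <;> simp [hc] <;> omega

theorem lastHit_eq_firstHit (t : Char) (l : List Char) : ∀ (i v : Int),
    lastHit t l i v = firstHit t l.reverse (i + l.length - 1) v := by
  induction l with
  | nil => intro i v; simp [lastHit, firstHit]
  | cons c rest ih =>
    intro i v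
    rw [lastHit, ih, List.reverse_cons, firstHit_append]
    have hpos : i + 1 + (rest.length : Int) - 1 = i + ((c :: rest).length : Int) - 1 := by
      push_cast [List.length_cons]; ring
    rw [hpos]
    congr 1
    by_cases hc : c = t <;> simp [hc] <;> omega

theorem loopB_eq_map (l : List Char) : ∀ (i : Int) (last : Int × Int × Int × Int),
    loopB l i last = (List.range l.length).map (fun k =>
      let r := foldStep (l.take (k + 1)) i last
      [r.1, r.2.1, r.2.2.1, r.2.2.2]) := by
  induction l with
  | nil => intro i last; simp [loopB]
  | cons ch rest ih =>
    intro i last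
    simp only [loopB, List.length_cons, List.range_succ_eq_map, List.map_cons,
      List.map_map, ih]
    congr 1

theorem row_eq (l : List Char) (k : Nat) (hk : k < l.length) :
    rowA (l.take (k + 1)) =
      (let r := foldStep (l.take (k + 1)) 0 (-1, -1, -1, -1)
       [r.1, r.2.1, r.2.2.1, r.2.2.2]) := by
  have hlen : (l.take (k + 1)).length = k + 1 := by
    simp [List.length_take]; omega
  simp only [rowA, scanA_char, foldStep_char, lastHit_eq_firstHit, hlen, Fval]
  norm_num

-- ===== VERDICT (by name: the statement is the Claim_ definition above) =====
theorem BadCharMatrix_spec : Claim_equal_BadCharMatrix := by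
  intro motiv _
  unfold Spec_BadCharMatrix BadCharMatrix BadCharMatrix_alt
  rw [loopB_eq_map]
  apply List.map_congr_left
  intro k hk
  exact row_eq motiv.toList k (List.mem_range.mp hk)
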